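-- pv_equiv track=rewrite | github.com/charansai1432/Python-DSA | sliding window/fixed/anagram/all_substrings_with_exactly_k_distinct_chars.py | all_substrings_with_exactly_k_distinct_chars
-- ===== SOURCE A (Python) =====
-- def all_substrings_with_exactly_k_distinct_chars(s,k):
--     from collections import Counter
--     n = len(s)
--
--     result = []
--
--     w_count = Counter()
--
--     for i in range(n):
--
--         w_count[s[i]] += 1
--
--         if i >= k:
--             w_count[s[i-k]] -= 1
--
--             if w_count[s[i-k]] == 0:
--                 del w_count[s[i-k]]
--
--         if i >= k - 1:
--
--             if len((w_count)) == k: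
--                 result.append(i-k+1)        #starting position i-k+1 window_starting position
--     return result
-- ===== SOURCE B (Python) =====
-- def all_substrings_with_exactly_k_distinct_chars(s, k):
--     n = len(s)
--     result = []
--     for i in range(n):
--         if i >= k - 1:
--             start = i - k + 1
--             if len(set(s[start:i+1])) == k:
--                 result.append(start)
--     return result
-- ===== Notes on version B (the rewrite author's own statement) =====
-- stated objective: simpler
-- what changed: Replaces the incremental Counter maintenance (add entering char, decrement/delete leaving char) with a direct per-window recomputation: for each window start it takes the slice and counts its distinct characters with set(), so no mutable counter state is carried between iterations.
import Mathlib
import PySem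

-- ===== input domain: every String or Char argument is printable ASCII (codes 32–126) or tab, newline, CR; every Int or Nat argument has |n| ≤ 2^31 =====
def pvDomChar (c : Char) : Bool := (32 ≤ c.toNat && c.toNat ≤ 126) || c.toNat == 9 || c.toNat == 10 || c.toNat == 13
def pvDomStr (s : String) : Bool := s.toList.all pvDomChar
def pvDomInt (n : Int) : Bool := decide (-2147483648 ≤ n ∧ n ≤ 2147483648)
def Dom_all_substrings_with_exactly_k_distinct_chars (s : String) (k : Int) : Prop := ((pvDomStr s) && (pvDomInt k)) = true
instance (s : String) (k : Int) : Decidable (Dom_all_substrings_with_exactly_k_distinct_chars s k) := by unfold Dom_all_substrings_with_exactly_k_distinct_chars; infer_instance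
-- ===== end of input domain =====

-- B replaces A's incremental Counter maintenance with a direct per-window recomputation of the
-- distinct-character set of each slice (objective: simpler — no mutable counter state carried).

-- ===== PORT A =====
-- loop body of A (for i in range(n): update the Counter, then maybe append i-k+1)
def pvStepA (cs : List Char) (k : Int) (st : PySem.Dict Char Int × List Int) (i : Int) :
    PySem.Dict Char Int × List Int :=
  let c := PySem.List.pyGetD cs i ' '           -- s[i]; i is always in range here
  let d := st.1.insert c (st.1.getD c 0 + 1)    -- w_count[s[i]] += 1  (Counter: missing key reads 0)
  let d := if k ≤ i then                        -- if i >= k: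
      -- s[i-k] raises IndexError exactly when k < 0 on a non-empty string (excluded by Pre_);
      -- inside Pre_ this index is always in range, so pyGetD's default is never used
      let co := PySem.List.pyGetD cs (i - k) ' '
      let d := d.insert co (d.getD co 0 - 1)    -- w_count[s[i-k]] -= 1
      if d.getD co 0 == 0 then d.erase co else d  -- if w_count[s[i-k]] == 0: del w_count[s[i-k]]
    else d
  if k - 1 ≤ i then                             -- if i >= k - 1:
    (d, if (d.size : Int) == k then st.2 ++ [i - k + 1] else st.2)  -- if len(w_count) == k: append
  else (d, st.2)

def all_substrings_with_exactly_k_distinct_chars (s : String) (k : Int) : List Int :=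
  let cs := s.toList
  ((PySem.List.pyRange 0 (cs.length : Int) 1).foldl (pvStepA cs k)
      ((PySem.Dict.empty : PySem.Dict Char Int), ([] : List Int))).2

-- ===== PORT B =====
-- loop body of B (for i in range(n): recompute the window's distinct-char set directly)
def pvStepB (cs : List Char) (k : Int) (res : List Int) (i : Int) : List Int :=
  if k - 1 ≤ i then                             -- if i >= k - 1:
    let start := i - k + 1
    if ((PySem.Set.ofList (PySem.List.slice cs (some start) (some (i + 1)))).length : Int) == k
    then res ++ [start] else res                -- if len(set(s[start:i+1])) == k: append start
  else res

def all_substrings_with_exactly_k_distinct_chars_alt (s : String) (k : Int) : List Int :=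
  let cs := s.toList
  (PySem.List.pyRange 0 (cs.length : Int) 1).foldl (pvStepB cs k) []

-- ===== PRECONDITION & SPEC =====
-- Pre_ excludes exactly the inputs on which A raises: for k < 0 on a non-empty string,
-- s[i-k] eventually indexes past the end of s (IndexError). A returns normally everywhere else.
def Pre_all_substrings_with_exactly_k_distinct_chars (s : String) (k : Int) : Prop :=
  0 ≤ k ∨ s = ""
instance (s : String) (k : Int) : Decidable (Pre_all_substrings_with_exactly_k_distinct_chars s k) := by unfold Pre_all_substrings_with_exactly_k_distinct_chars; infer_instance

def pvWitness_all_substrings_with_exactly_k_distinct_chars : String × Int := ("abcab", 2)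

def Spec_all_substrings_with_exactly_k_distinct_chars (s : String) (k : Int) (out : List Int) : Prop := out = all_substrings_with_exactly_k_distinct_chars_alt s k
instance (s : String) (k : Int) (out : List Int) : Decidable (Spec_all_substrings_with_exactly_k_distinct_chars s k out) := by unfold Spec_all_substrings_with_exactly_k_distinct_chars; infer_instance

-- ===== CLAIM (what is proved, stated in full; the proofs are below) =====
def Claim_equal_all_substrings_with_exactly_k_distinct_chars : Prop := ∀ (s : String) (k : Int), Dom_all_substrings_with_exactly_k_distinct_chars s k → Pre_all_substrings_with_exactly_k_distinct_chars s k → Spec_all_substrings_with_exactly_k_distinct_chars s k (all_substrings_with_exactly_k_distinct_chars s k)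


-- ===== LEMMAS AND PROOFS =====

-- the window of characters A's Counter holds after the first m loop iterations (for k = kn ≥ 0)
def pvWin (cs : List Char) (kn m : Nat) : List Char := (cs.take m).drop (m - kn)

-- the invariant tying A's Counter to the current window: it counts exactly the window's
-- characters, with unique keys and no zero entries
def pvDictInv (d : PySem.Dict Char Int) (w : List Char) : Prop :=
  d.keys.Nodup ∧ (∀ c, d.getD c 0 = (w.count c : Int)) ∧ (∀ p ∈ d.items, p.2 ≠ 0)

-- facts about PySem.Dict.erase (items.filter under the hood; the prelude has no erase lemmas)
theorem pvGet?_erase_list (c c' : Char) : ∀ (l : List (Char × Int)),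
    ((PySem.Dict.mk l).erase c).get? c' = if c' = c then none else (PySem.Dict.mk l).get? c'
  | [] => by simp [PySem.Dict.erase, PySem.Dict.get?]
  | (k, v) :: t => by
    have ih := pvGet?_erase_list c c' t
    show (PySem.Dict.mk (((k, v) :: t).filter _)).get? c' = _
    rw [List.filter_cons]
    by_cases h1 : k = c
    · rw [if_neg (by simp [h1])]
      rw [show ((PySem.Dict.mk (t.filter fun p => !p.1 == c)).get? c') = ((PySem.Dict.mk t).erase c).get? c' from rfl, ih]
      by_cases h2 : c' = c
      · simp [h2]
      · rw [if_neg h2, if_neg h2, PySem.Dict.get?_mk_cons]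
        rw [if_neg (by simp; intro h; exact h2 (h1 ▸ h).symm)]
    · rw [if_pos (by simp [h1])]
      by_cases h3 : c' = c
      · rw [if_pos h3, PySem.Dict.get?_mk_cons]
        rw [if_neg (by simp; intro h; exact h1 (h ▸ h3))]
        rw [show ((PySem.Dict.mk (t.filter fun p => !p.1 == c)).get? c') = ((PySem.Dict.mk t).erase c).get? c' from rfl, ih, if_pos h3]
      · rw [if_neg h3, PySem.Dict.get?_mk_cons, PySem.Dict.get?_mk_cons]
        by_cases h2 : k = c'
        · simp [h2]
        · rw [if_neg (by simp [h2]), if_neg (by simp [h2])]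
          rw [show ((PySem.Dict.mk (t.filter fun p => !p.1 == c)).get? c') = ((PySem.Dict.mk t).erase c).get? c' from rfl, ih, if_neg h3]

theorem pvGet?_erase (d : PySem.Dict Char Int) (c c' : Char) :
    (d.erase c).get? c' = if c' = c then none else d.get? c' := by
  obtain ⟨l⟩ := d; exact pvGet?_erase_list c c' l

theorem pvMem_items_erase (d : PySem.Dict Char Int) (c : Char)
    (p : Char × Int) : p ∈ (d.erase c).items ↔ p ∈ d.items ∧ p.1 ≠ c := by
  simp [PySem.Dict.erase, List.mem_filter]

theorem pvNodup_keys_erase (d : PySem.Dict Char Int) (c : Char)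
    (h : d.keys.Nodup) : (d.erase c).keys.Nodup := by
  simp only [PySem.Dict.keys, PySem.Dict.erase] at *
  exact (List.filter_sublist.map _).nodup h

theorem pvGetD_erase (d : PySem.Dict Char Int) (c c' : Char) (v : Int) :
    (d.erase c).getD c' v = if c' = c then v else d.getD c' v := by
  simp only [PySem.Dict.getD, pvGet?_erase]
  split <;> rfl

-- from the invariant: the Counter's len equals the window's number of distinct characters
theorem pvSize_eq (d : PySem.Dict Char Int) (w : List Char) (h : pvDictInv d w) :
    d.size = (PySem.Set.ofList w).length := by
  obtain ⟨hnd, hcnt, hnz⟩ := h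
  have hmem : ∀ c, c ∈ d.keys ↔ c ∈ PySem.Set.ofList w := by
    intro c
    rw [PySem.Set.mem_ofList]
    constructor
    · intro hc
      obtain ⟨p, hp, hpc⟩ := List.mem_map.mp hc
      have hg0 : d.get? p.1 = some p.2 := PySem.Dict.get?_of_mem_items d hp hnd
      have hg : d.getD p.1 0 = p.2 := by simp [PySem.Dict.getD, hg0]
      have hne := hnz p hp
      have hc0 : w.count p.1 ≠ 0 := by
        intro h0
        rw [hcnt p.1, h0] at hg
        exact hne (by simpa using hg.symm)
      subst hpc
      exact List.count_pos_iff.mp (Nat.pos_of_ne_zero hc0)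
    · intro hc
      by_contra hk
      have hcon : d.contains c = false := by
        rcases hcc : d.contains c
        · rfl
        · exact absurd ((PySem.Dict.contains_iff_mem_keys d c).mp hcc) hk
      have h1 := PySem.Dict.getD_of_not_contains d (0 : Int) hcon
      rw [hcnt c] at h1
      have h2 : w.count c = 0 := by exact_mod_cast h1
      exact (List.count_pos_iff.mpr hc).ne' h2
  have hperm : d.keys.Perm (PySem.Set.ofList w) :=
    (List.perm_ext_iff_of_nodup hnd (PySem.Set.nodup_ofList w)).mpr hmem
  simpa [PySem.Dict.size, PySem.Dict.keys] using hperm.length_eq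

-- the invariant survives adding the entering character
theorem pvInv_inc (d : PySem.Dict Char Int) (w : List Char) (c : Char) (h : pvDictInv d w) :
    pvDictInv (d.insert c (d.getD c 0 + 1)) (w ++ [c]) := by
  obtain ⟨hnd, hcnt, hnz⟩ := h
  refine ⟨PySem.Dict.nodup_keys_insert d c _ hnd, ?_, ?_⟩
  · intro c'
    rw [PySem.Dict.getD_insert]
    by_cases hc : c' = c
    · rw [if_pos hc, hc, hcnt c]; simp [List.count_append]
    · rw [if_neg hc, hcnt c']
      simp [List.count_append, Ne.symm hc]
  · intro p hp
    rcases (PySem.Dict.mem_items_insert d c _ p).mp hp with h1 | ⟨h1, _⟩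
    · subst h1
      simp only [hcnt c]
      have : (0:Int) ≤ (w.count c : Int) := by positivity
      omega
    · exact hnz p h1

-- the invariant survives removing the leaving character (decrement, then delete if zero)
theorem pvInv_dec (d : PySem.Dict Char Int) (w : List Char) (co : Char)
    (h : pvDictInv d (co :: w)) :
    pvDictInv (let d2 := d.insert co (d.getD co 0 - 1);
               if d2.getD co 0 == 0 then d2.erase co else d2) w := by
  obtain ⟨hnd, hcnt, hnz⟩ := h
  have hnew : ∀ c', (d.insert co (d.getD co 0 - 1)).getD c' 0 = (w.count c' : Int) := by
    intro c'
    rw [PySem.Dict.getD_insert]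
    by_cases hc : c' = co
    · rw [if_pos hc, hc, hcnt co, List.count_cons_self]; push_cast; ring
    · rw [if_neg hc, hcnt c', List.count_cons_of_ne (Ne.symm hc)]
  have hnd1 : (d.insert co (d.getD co 0 - 1)).keys.Nodup :=
    PySem.Dict.nodup_keys_insert d co _ hnd
  simp only
  split
  next heq =>
    refine ⟨pvNodup_keys_erase _ co hnd1, ?_, ?_⟩
    · intro c'
      rw [pvGetD_erase]
      by_cases hc : c' = co
      · rw [if_pos hc, hc]
        have h0 : (d.insert co (d.getD co 0 - 1)).getD co 0 = 0 := by
          simpa using heq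
        rw [hnew co] at h0
        exact h0.symm
      · rw [if_neg hc]; exact hnew c'
    · intro p hp
      obtain ⟨hp1, hp2⟩ := (pvMem_items_erase _ co p).mp hp
      rcases (PySem.Dict.mem_items_insert d co _ p).mp hp1 with h1 | ⟨h1, _⟩
      · exact absurd (by rw [h1]) hp2
      · exact hnz p h1
  next heq =>
    refine ⟨hnd1, hnew, ?_⟩
    intro p hp
    have hne : (d.insert co (d.getD co 0 - 1)).getD co 0 ≠ 0 := by
      intro h0; rw [h0] at heq; simp at heq
    rcases (PySem.Dict.mem_items_insert d co _ p).mp hp with h1 | ⟨h1, _⟩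
    · subst h1
      simpa [PySem.Dict.getD_insert] using hne
    · exact hnz p h1

-- the window after one more iteration: entering char appended, leaving char is the head
theorem pvWin_step_lt (cs : List Char) (kn m : Nat) (hm : m < cs.length) (hk : m < kn) :
    pvWin cs kn (m + 1) = pvWin cs kn m ++ [cs[m]] := by
  unfold pvWin
  rw [Nat.sub_eq_zero_of_le (le_of_lt hk), Nat.sub_eq_zero_of_le hk]
  simp only [List.drop_zero]
  exact List.take_succ_eq_append_getElem hm

theorem pvWin_step_ge (cs : List Char) (kn m : Nat) (hm : m < cs.length) (hk : kn ≤ m) :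
    pvWin cs kn m ++ [cs[m]] = cs[m - kn]'(by omega) :: pvWin cs kn (m + 1) := by
  unfold pvWin
  have h1 : m - kn ≤ (cs.take m).length := by simp; omega
  rw [← List.drop_append_of_le_length h1, ← List.take_succ_eq_append_getElem hm]
  have h2 : m - kn < (cs.take (m+1)).length := by simp; omega
  rw [List.drop_eq_getElem_cons h2]
  have h3 : m + 1 - kn = (m - kn) + 1 := by omega
  rw [h3]
  congr 1
  exact List.getElem_take

-- B's slice s[i-k+1:i+1] IS the window
theorem pvSlice_eq (cs : List Char) (kn m : Nat) (hkm : kn ≤ m + 1) :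
    PySem.List.slice cs (some ((m : Int) - (kn : Int) + 1)) (some ((m : Int) + 1)) =
      pvWin cs kn (m + 1) := by
  rw [show ((m : Int) - (kn : Int) + 1) = ((m + 1 - kn : Nat) : Int) by omega,
      show ((m : Int) + 1) = ((m + 1 : Nat) : Int) by push_cast; ring,
      PySem.List.slice_natCast]
  unfold pvWin
  rw [List.drop_take]

theorem pvGetD_at (cs : List Char) (j : Nat) (hj : j < cs.length) :
    PySem.List.pyGetD cs (j : Int) ' ' = cs[j] := by
  rw [PySem.List.pyGetD_eq_getElem cs ' ' (by positivity) (by exact_mod_cast hj)]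
  simp

-- one loop iteration: A's state keeps the invariant and its result takes B's step
theorem pvStep_both (cs : List Char) (kn m : Nat) (hm : m < cs.length)
    (st : PySem.Dict Char Int × List Int) (h1 : pvDictInv st.1 (pvWin cs kn m)) :
    pvDictInv (pvStepA cs (kn : Int) st (m : Int)).1 (pvWin cs kn (m + 1)) ∧
    (pvStepA cs (kn : Int) st (m : Int)).2 = pvStepB cs (kn : Int) st.2 (m : Int) := by
  obtain ⟨d, res⟩ := st
  simp only [pvStepA, pvStepB]
  rw [pvGetD_at cs m hm]
  have hinc := pvInv_inc d _ cs[m] h1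
  by_cases hkm : kn ≤ m
  · rw [if_pos (by exact_mod_cast hkm : (kn : Int) ≤ (m : Int))]
    rw [show ((m : Int) - (kn : Int)) = ((m - kn : Nat) : Int) by omega]
    rw [pvGetD_at cs (m - kn) (by omega)]
    rw [pvWin_step_ge cs kn m hm hkm] at hinc
    have hdec := pvInv_dec _ (pvWin cs kn (m + 1)) _ hinc
    simp only at hdec
    by_cases hout : (kn : Int) - 1 ≤ (m : Int)
    · rw [if_pos hout, if_pos hout]
      refine ⟨hdec, ?_⟩
      have hsl : PySem.List.slice cs (some (((m - kn : Nat) : Int) + 1)) (some ((m : Int) + 1)) =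
          pvWin cs kn (m + 1) := by
        rw [show (((m - kn : Nat) : Int) + 1) = ((m + 1 - kn : Nat) : Int) by omega,
            show ((m : Int) + 1) = ((m + 1 : Nat) : Int) by push_cast; ring,
            PySem.List.slice_natCast]
        unfold pvWin
        rw [List.drop_take]
      rw [hsl, ← pvSize_eq _ _ hdec]
    · rw [if_neg hout, if_neg hout]
      exact ⟨hdec, rfl⟩
  · rw [if_neg (by exact_mod_cast hkm : ¬ (kn : Int) ≤ (m : Int))]
    rw [← pvWin_step_lt cs kn m hm (by omega)] at hinc
    by_cases hout : (kn : Int) - 1 ≤ (m : Int)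
    · rw [if_pos hout, if_pos hout]
      refine ⟨hinc, ?_⟩
      rw [pvSlice_eq cs kn m (by omega), ← pvSize_eq _ _ hinc]
    · rw [if_neg hout, if_neg hout]
      exact ⟨hinc, rfl⟩

-- the loop invariant: after m iterations A's state is (a counter of the window, B's result so far)
theorem pvLoop (cs : List Char) (kn : Nat) :
    ∀ m : Nat, m ≤ cs.length →
      pvDictInv ((PySem.List.pyRange 0 (m : Int) 1).foldl (pvStepA cs (kn : Int))
          (PySem.Dict.empty, [])).1 (pvWin cs kn m) ∧
      ((PySem.List.pyRange 0 (m : Int) 1).foldl (pvStepA cs (kn : Int))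
          (PySem.Dict.empty, [])).2 =
        (PySem.List.pyRange 0 (m : Int) 1).foldl (pvStepB cs (kn : Int)) [] := by
  intro m
  induction m with
  | zero =>
    intro _
    constructor
    · show pvDictInv PySem.Dict.empty (pvWin cs kn 0)
      refine ⟨by simp [PySem.Dict.keys, PySem.Dict.empty], ?_, by simp [PySem.Dict.empty]⟩
      intro c
      simp [PySem.Dict.getD_empty, pvWin]
    · rfl
  | succ m ih =>
    intro hm
    obtain ⟨ih1, ih2⟩ := ih (by omega)
    rw [show ((m + 1 : Nat) : Int) = (m : Int) + 1 by push_cast; ring,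
        PySem.List.pyRange_one_succ_right (by positivity),
        List.foldl_append, List.foldl_append, List.foldl_cons, List.foldl_cons,
        List.foldl_nil, List.foldl_nil]
    obtain ⟨hA, hB⟩ := pvStep_both cs kn m (by omega) _ ih1
    exact ⟨hA, by rw [hB, ih2]⟩

-- ===== VERDICT (by name: the statement is the Claim_ definition above) =====
theorem all_substrings_with_exactly_k_distinct_chars_spec : Claim_equal_all_substrings_with_exactly_k_distinct_chars := by
  intro s k _ hpre
  unfold Spec_all_substrings_with_exactly_k_distinct_chars
  rcases hpre with hk | hs
  · unfold all_substrings_with_exactly_k_distinct_chars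
      all_substrings_with_exactly_k_distinct_chars_alt
    rw [show k = ((k.toNat : Nat) : Int) from (Int.toNat_of_nonneg hk).symm]
    exact (pvLoop s.toList k.toNat s.toList.length le_rfl).2
  · subst hs; rfl
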